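-- pv_equiv track=rewrite | github.com/mishkatmustafid/paper-trading-backend | app/api/v1/portfolio.py | merge_portfolio_stocks
-- ===== SOURCE A (Python) =====
-- from typing import Any, Dict, List, Optional
--
-- def merge_portfolio_stocks(portfolio_stocks: List[Dict]) -> List[Dict]:
--     merged_portfolio_stocks = {}
--
--     for stock in portfolio_stocks:
--         asset_id = stock["asset_id"]
--         if asset_id not in merged_portfolio_stocks:
--             merged_portfolio_stocks[asset_id] = stock.copy()
--         else:
--             merged_stock = merged_portfolio_stocks[asset_id]
--             merged_stock["quantity"] += stock["quantity"]
--             merged_stock["total_investment"] += stock["total_investment"]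
--
--     return list(merged_portfolio_stocks.values())
-- ===== SOURCE B (Python) =====
-- from typing import Dict, List
--
--
-- def merge_portfolio_stocks(portfolio_stocks: List[Dict]) -> List[Dict]:
--     # Two phases: distinct asset_ids in first-appearance order, then one
--     # scan per id collecting its group and folding the additions.
--     order = list(dict.fromkeys(stock["asset_id"] for stock in portfolio_stocks))
--     result = []
--     for asset_id in order:
--         group = [s for s in portfolio_stocks if s["asset_id"] == asset_id]
--         merged = group[0].copy()
--         for s in group[1:]:
--             merged["quantity"] += s["quantity"]
--             merged["total_investment"] += s["total_investment"]
--         result.append(merged)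
--     return result
-- ===== Notes on version B (the rewrite author's own statement) =====
-- stated objective: alternative
-- what changed: Instead of A's single pass that keeps a dict of partially merged stocks and mutates the entry on each repeat, B first extracts the distinct asset_ids in first-appearance order (dict.fromkeys) and then, per id, scans the list for that id's group and folds the quantity/total_investment additions over a copy of the group's first stock.
import Mathlib
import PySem

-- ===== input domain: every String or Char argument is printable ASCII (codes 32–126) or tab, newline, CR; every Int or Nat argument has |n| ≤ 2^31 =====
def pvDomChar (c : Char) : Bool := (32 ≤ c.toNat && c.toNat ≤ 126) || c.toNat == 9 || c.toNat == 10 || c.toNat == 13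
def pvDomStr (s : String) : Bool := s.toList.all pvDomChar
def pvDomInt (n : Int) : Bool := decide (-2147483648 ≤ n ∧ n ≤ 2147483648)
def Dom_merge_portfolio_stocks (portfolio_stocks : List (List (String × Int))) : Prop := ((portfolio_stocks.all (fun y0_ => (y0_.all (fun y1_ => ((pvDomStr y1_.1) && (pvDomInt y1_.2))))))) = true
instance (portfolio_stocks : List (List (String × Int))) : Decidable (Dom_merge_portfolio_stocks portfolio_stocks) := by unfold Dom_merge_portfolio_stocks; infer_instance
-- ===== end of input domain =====

-- B lists the distinct asset_ids first and then scans the input once per id to fold its group,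
-- instead of A's single pass mutating a dict of partial merges; same results (alternative decomposition).

-- ===== PORT A =====
-- stock["asset_id"]; the default is only reached when the key is missing, where Python raises KeyError (excluded by Pre_)
def pvKey (stock : List (String × Int)) : Int := (PySem.Dict.mk stock).getD "asset_id" 0

-- the two `+=` lines that A and B share verbatim; defaults only reached where Python raises KeyError (excluded by Pre_)
def pvAdd (m : PySem.Dict String Int) (stock : List (String × Int)) : PySem.Dict String Int :=
  (m.modify "quantity" 0 (· + (PySem.Dict.mk stock).getD "quantity" 0)).modify
    "total_investment" 0 (· + (PySem.Dict.mk stock).getD "total_investment" 0)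

def merge_portfolio_stocks (portfolio_stocks : List (List (String × Int))) : List (List (String × Int)) :=
  ((portfolio_stocks.foldl
      (fun acc stock =>
        if acc.contains (pvKey stock) = false then
          acc.insert (pvKey stock) (PySem.Dict.mk stock)
        else
          acc.modify (pvKey stock) PySem.Dict.empty (fun m => pvAdd m stock))
      (PySem.Dict.empty : PySem.Dict Int (PySem.Dict String Int))).values).map PySem.Dict.items

-- ===== PORT B =====
def merge_portfolio_stocks_alt (portfolio_stocks : List (List (String × Int))) : List (List (String × Int)) :=
  (PySem.List.dedup (portfolio_stocks.map pvKey)).map (fun asset_id =>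
    match portfolio_stocks.filter (fun s => pvKey s == asset_id) with
    | [] => []   -- unreachable: asset_id comes from the list itself
    | g0 :: rest => (rest.foldl pvAdd (PySem.Dict.mk g0)).items)

-- ===== PRECONDITION & SPEC =====
-- Pre_ excludes exactly the inputs where A raises KeyError: a stock without an "asset_id" key,
-- or a stock of a repeated asset_id without "quantity" or "total_investment".
def Pre_merge_portfolio_stocks (portfolio_stocks : List (List (String × Int))) : Prop :=
  ∀ s ∈ portfolio_stocks,
    (PySem.Dict.mk s).contains "asset_id" = true ∧
    (2 ≤ portfolio_stocks.countP (fun t => pvKey t == pvKey s) →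
      (PySem.Dict.mk s).contains "quantity" = true ∧
      (PySem.Dict.mk s).contains "total_investment" = true)
instance (portfolio_stocks : List (List (String × Int))) : Decidable (Pre_merge_portfolio_stocks portfolio_stocks) := by unfold Pre_merge_portfolio_stocks; infer_instance

def pvWitness_merge_portfolio_stocks : (List (List (String × Int))) :=
  [[("asset_id", 1), ("quantity", 2), ("total_investment", 3)],
   [("asset_id", 1), ("quantity", 4), ("total_investment", 5)],
   [("asset_id", 7), ("name", 9)]]

def Spec_merge_portfolio_stocks (portfolio_stocks : List (List (String × Int))) (out : List (List (String × Int))) : Prop := out = merge_portfolio_stocks_alt portfolio_stocks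
instance (portfolio_stocks : List (List (String × Int))) (out : List (List (String × Int))) : Decidable (Spec_merge_portfolio_stocks portfolio_stocks out) := by unfold Spec_merge_portfolio_stocks; infer_instance

-- ===== CLAIM (what is proved, stated in full; the proofs are below) =====
def Claim_equal_merge_portfolio_stocks : Prop := ∀ (portfolio_stocks : List (List (String × Int))), Dom_merge_portfolio_stocks portfolio_stocks → Pre_merge_portfolio_stocks portfolio_stocks → Spec_merge_portfolio_stocks portfolio_stocks (merge_portfolio_stocks portfolio_stocks)

-- ===== LEMMAS AND PROOFS =====
-- the merged dict of one asset_id's group, as B computes it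
def pvMergedOf (g : List (List (String × Int))) : PySem.Dict String Int :=
  match g with
  | [] => PySem.Dict.empty
  | g0 :: rest => rest.foldl pvAdd (PySem.Dict.mk g0)

-- characterisation of A's accumulator: items = one (aid, merged group) pair per distinct key, in first-appearance order
theorem pvMain (ps : List (List (String × Int))) :
    (ps.foldl
      (fun acc stock =>
        if acc.contains (pvKey stock) = false then
          acc.insert (pvKey stock) (PySem.Dict.mk stock)
        else
          acc.modify (pvKey stock) PySem.Dict.empty (fun m => pvAdd m stock))
      (PySem.Dict.empty : PySem.Dict Int (PySem.Dict String Int))).items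
    = (PySem.Set.ofList (ps.map pvKey)).map
        (fun aid => (aid, pvMergedOf (ps.filter (fun s => pvKey s == aid)))) := by
  induction ps using List.reverseRecOn with
  | nil => rfl
  | append_singleton ps s ih =>
    rw [List.foldl_append, List.map_append,
      show List.map pvKey [s] = [pvKey s] from rfl, PySem.Set.ofList_append_singleton]
    set F := ps.foldl
      (fun acc stock =>
        if acc.contains (pvKey stock) = false then
          acc.insert (pvKey stock) (PySem.Dict.mk stock)
        else
          acc.modify (pvKey stock) PySem.Dict.empty (fun m => pvAdd m stock))
      (PySem.Dict.empty : PySem.Dict Int (PySem.Dict String Int)) with hF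
    have hkeys : F.keys = PySem.Set.ofList (ps.map pvKey) := by
      show F.items.map (·.1) = _
      rw [ih, List.map_map]
      simp [Function.comp_def]
    have hnodup : F.keys.Nodup := by rw [hkeys]; exact PySem.Set.nodup_ofList _
    by_cases hk : pvKey s ∈ PySem.Set.ofList (ps.map pvKey)
    · -- repeated key: A takes the modify branch, the Set.add is a no-op
      have hc : F.contains (pvKey s) = true := by
        rw [PySem.Dict.contains_iff_mem_keys, hkeys]; exact hk
      simp only [List.foldl_cons, List.foldl_nil, hc, Bool.true_eq_false, if_false]
      have hget : F.getD (pvKey s) PySem.Dict.empty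
          = pvMergedOf (ps.filter (fun t => pvKey t == pvKey s)) := by
        refine PySem.Dict.getD_of_mem_items F ?_ hnodup _
        rw [ih]
        exact List.mem_map.mpr ⟨pvKey s, hk, rfl⟩
      rw [PySem.Dict.modify, hget,
        PySem.Dict.items_insert_of_contains _ _ hc, ih, List.map_map,
        PySem.Set.add_of_mem hk]
      apply List.map_congr_left
      intro aid haid
      simp only [Function.comp_def]
      rw [List.filter_append]
      by_cases he : aid = pvKey s
      · subst he
        simp only [beq_self_eq_true, if_true, List.filter]
        have hne : ps.filter (fun t => pvKey t == pvKey s) ≠ [] := by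
          rcases List.mem_map.mp ((PySem.Set.mem_ofList _ _).mp haid) with ⟨t, ht, hkt⟩
          intro h
          have h2 := List.filter_eq_nil_iff.mp h t ht
          simp [hkt] at h2
        rcases hg : ps.filter (fun t => pvKey t == pvKey s) with _ | ⟨g0, rest⟩
        · exact absurd hg hne
        · simp [pvMergedOf, List.foldl_append]
      · have hbe : (aid == pvKey s) = false := by simp [he]
        simp [hbe, Ne.symm he]
    · -- fresh key: A takes the insert branch, both sides append one pair
      have hc : F.contains (pvKey s) = false := by
        rw [Bool.eq_false_iff]
        intro h
        exact hk (hkeys ▸ (PySem.Dict.contains_iff_mem_keys F _).mp h)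
      simp only [List.foldl_cons, List.foldl_nil, hc, if_true]
      rw [PySem.Dict.items_insert_of_not_contains _ _ hc, ih,
        PySem.Set.add_of_not_mem hk, List.map_append]
      congr 1
      · apply List.map_congr_left
        intro aid haid
        have he : aid ≠ pvKey s := fun h => hk (h ▸ haid)
        rw [List.filter_append]
        simp [Ne.symm he]
      · have hnil : ps.filter (fun t => pvKey t == pvKey s) = [] := by
          rw [List.filter_eq_nil_iff]
          intro t ht h
          exact hk ((PySem.Set.mem_ofList _ _).mpr (List.mem_map.mpr ⟨t, ht, by simpa using h⟩))
        simp [List.filter_append, hnil, pvMergedOf]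

-- ===== VERDICT (by name: the statement is the Claim_ definition above) =====
theorem merge_portfolio_stocks_spec : Claim_equal_merge_portfolio_stocks := by
  intro ps _ _
  unfold Spec_merge_portfolio_stocks merge_portfolio_stocks merge_portfolio_stocks_alt
  rw [show ∀ d : PySem.Dict Int (PySem.Dict String Int), d.values = d.items.map (·.2) from fun _ => rfl,
    pvMain, List.map_map, List.map_map, PySem.List.dedup]
  apply List.map_congr_left
  intro aid haid
  simp only [Function.comp_def]
  have hne : ps.filter (fun t => pvKey t == aid) ≠ [] := by
    rcases List.mem_map.mp ((PySem.Set.mem_ofList _ _).mp haid) with ⟨t, ht, hkt⟩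
    intro h
    have h2 := List.filter_eq_nil_iff.mp h t ht
    simp [hkt] at h2
  rcases hg : ps.filter (fun t => pvKey t == aid) with _ | ⟨g0, rest⟩
  · exact absurd hg hne
  · simp [pvMergedOf]
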